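-- pv_equiv track=rewrite | github.com/AzeemWaqar-R3BIRTH/SecureTrainer | app/models/user_model.py | get_role_for_level
-- ===== SOURCE A (Python) =====
-- def get_role_for_level(level):
--     """Get role based on user level with enhanced progression."""
--     role_thresholds = [
--         (1, "Trainee"),
--         (5, "Junior Analyst"),
--         (10, "Analyst"),
--         (15, "Senior Analyst"),
--         (20, "Specialist"),
--         (25, "Expert"),
--         (30, "Lead Analyst"),
--         (35, "Team Lead"),
--         (40, "Department Head"),
--         (45, "Security Architect"),
--         (50, "Chief Security Officer")
--     ]
--
--     for threshold, role in reversed(role_thresholds):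
--         if level >= threshold:
--             return role
--
--     return "Trainee"
-- ===== SOURCE B (Python) =====
-- THRESHOLDS = [1, 5, 10, 15, 20, 25, 30, 35, 40, 45, 50]
-- ROLES = ["Trainee", "Junior Analyst", "Analyst", "Senior Analyst", "Specialist",
--          "Expert", "Lead Analyst", "Team Lead", "Department Head",
--          "Security Architect", "Chief Security Officer"]
--
--
-- def get_role_for_level(level):
--     """Get role based on user level with enhanced progression."""
--     # binary search: index of highest threshold <= level (bisect_right - 1)
--     lo, hi = 0, len(THRESHOLDS)
--     while lo < hi:
--         mid = (lo + hi) // 2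
--         if level < THRESHOLDS[mid]:
--             hi = mid
--         else:
--             lo = mid + 1
--     idx = lo - 1
--     if idx < 0:
--         return "Trainee"
--     return ROLES[idx]
-- ===== Notes on version B (the rewrite author's own statement) =====
-- stated objective: alternative
-- what changed: Replaced the reversed linear scan over (threshold, role) pairs with a hand-written bisect_right binary search over a sorted threshold list indexing a parallel role list.
import Mathlib
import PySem

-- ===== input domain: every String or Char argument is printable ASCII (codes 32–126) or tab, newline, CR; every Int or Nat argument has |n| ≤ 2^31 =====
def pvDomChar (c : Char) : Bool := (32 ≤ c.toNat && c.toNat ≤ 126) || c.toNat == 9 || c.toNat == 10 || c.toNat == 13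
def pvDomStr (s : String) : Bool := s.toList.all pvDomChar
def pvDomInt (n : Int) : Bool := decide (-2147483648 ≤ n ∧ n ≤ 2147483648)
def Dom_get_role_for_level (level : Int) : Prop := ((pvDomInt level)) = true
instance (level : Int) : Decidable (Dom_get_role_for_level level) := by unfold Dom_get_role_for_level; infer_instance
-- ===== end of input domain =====

-- B replaces A's reversed linear scan with a binary search into a sorted threshold table (alternative decomposition, same result).

-- ===== PORT A =====
-- the reversed(role_thresholds) loop: first pair with level >= threshold wins, else "Trainee"
def pvALoop (level : Int) : List (Int × String) → String
  | [] => "Trainee"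
  | (t, r) :: rest => if level ≥ t then r else pvALoop level rest

def get_role_for_level (level : Int) : String :=
  let role_thresholds : List (Int × String) :=
    [(1, "Trainee"), (5, "Junior Analyst"), (10, "Analyst"), (15, "Senior Analyst"),
     (20, "Specialist"), (25, "Expert"), (30, "Lead Analyst"), (35, "Team Lead"),
     (40, "Department Head"), (45, "Security Architect"), (50, "Chief Security Officer")]
  pvALoop level role_thresholds.reverse

-- ===== PORT B =====
def pvThresholds : List Int := [1, 5, 10, 15, 20, 25, 30, 35, 40, 45, 50]
def pvRoles : List String :=
  ["Trainee", "Junior Analyst", "Analyst", "Senior Analyst", "Specialist",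
   "Expert", "Lead Analyst", "Team Lead", "Department Head",
   "Security Architect", "Chief Security Officer"]

-- the while lo < hi loop of Source B; fuel = list length bounds the iterations (hi - lo shrinks every step)
def pvBisectGo : Nat → Int → Nat → Nat → Nat
  | 0, _, lo, _ => lo
  | g + 1, level, lo, hi =>
    if lo < hi then
      let mid := (lo + hi) / 2
      if level < pvThresholds.getD mid 0 then pvBisectGo g level lo mid
      else pvBisectGo g level (mid + 1) hi
    else lo

def get_role_for_level_alt (level : Int) : String :=
  let lo := pvBisectGo pvThresholds.length level 0 pvThresholds.length
  if lo = 0 then "Trainee" else pvRoles.getD (lo - 1) "Trainee"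

-- ===== PRECONDITION & SPEC =====
def Spec_get_role_for_level (level : Int) (out : String) : Prop := out = get_role_for_level_alt level
instance (level : Int) (out : String) : Decidable (Spec_get_role_for_level level out) := by unfold Spec_get_role_for_level; infer_instance

-- ===== CLAIM (what is proved, stated in full; the proofs are below) =====
def Claim_equal_get_role_for_level : Prop := ∀ (level : Int), Dom_get_role_for_level level → Spec_get_role_for_level level (get_role_for_level level)

-- ===== LEMMAS AND PROOFS =====

lemma pvB_0_0 (level : Int) : pvBisectGo 7 level 0 0 = 0 := rfl

lemma pvB_1_1 (level : Int) : pvBisectGo 7 level 1 1 = 1 := rfl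

lemma pvB_3_3 (level : Int) : pvBisectGo 7 level 3 3 = 3 := rfl

lemma pvB_4_4 (level : Int) : pvBisectGo 7 level 4 4 = 4 := rfl

lemma pvB_6_6 (level : Int) : pvBisectGo 7 level 6 6 = 6 := rfl

lemma pvB_7_7 (level : Int) : pvBisectGo 7 level 7 7 = 7 := rfl

lemma pvB_9_9 (level : Int) : pvBisectGo 7 level 9 9 = 9 := rfl

lemma pvB_10_10 (level : Int) : pvBisectGo 7 level 10 10 = 10 := rfl

lemma pvB_0_1 (level : Int) : pvBisectGo 8 level 0 1 = (if level < 1 then 0 else 1) := by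
  show (if level < 1 then pvBisectGo 7 level 0 0 else pvBisectGo 7 level 1 1) = _
  rw [pvB_0_0, pvB_1_1]

lemma pvB_2_2 (level : Int) : pvBisectGo 8 level 2 2 = 2 := rfl

lemma pvB_3_4 (level : Int) : pvBisectGo 8 level 3 4 = (if level < 15 then 3 else 4) := by
  show (if level < 15 then pvBisectGo 7 level 3 3 else pvBisectGo 7 level 4 4) = _
  rw [pvB_3_3, pvB_4_4]

lemma pvB_5_5 (level : Int) : pvBisectGo 8 level 5 5 = 5 := rfl

lemma pvB_6_7 (level : Int) : pvBisectGo 8 level 6 7 = (if level < 30 then 6 else 7) := by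
  show (if level < 30 then pvBisectGo 7 level 6 6 else pvBisectGo 7 level 7 7) = _
  rw [pvB_6_6, pvB_7_7]

lemma pvB_8_8 (level : Int) : pvBisectGo 8 level 8 8 = 8 := rfl

lemma pvB_9_10 (level : Int) : pvBisectGo 8 level 9 10 = (if level < 45 then 9 else 10) := by
  show (if level < 45 then pvBisectGo 7 level 9 9 else pvBisectGo 7 level 10 10) = _
  rw [pvB_9_9, pvB_10_10]

lemma pvB_11_11 (level : Int) : pvBisectGo 8 level 11 11 = 11 := rfl

lemma pvB_0_2 (level : Int) : pvBisectGo 9 level 0 2 = (if level < 5 then (if level < 1 then 0 else 1) else 2) := by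
  show (if level < 5 then pvBisectGo 8 level 0 1 else pvBisectGo 8 level 2 2) = _
  rw [pvB_0_1, pvB_2_2]

lemma pvB_3_5 (level : Int) : pvBisectGo 9 level 3 5 = (if level < 20 then (if level < 15 then 3 else 4) else 5) := by
  show (if level < 20 then pvBisectGo 8 level 3 4 else pvBisectGo 8 level 5 5) = _
  rw [pvB_3_4, pvB_5_5]

lemma pvB_6_8 (level : Int) : pvBisectGo 9 level 6 8 = (if level < 35 then (if level < 30 then 6 else 7) else 8) := by
  show (if level < 35 then pvBisectGo 8 level 6 7 else pvBisectGo 8 level 8 8) = _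
  rw [pvB_6_7, pvB_8_8]

lemma pvB_9_11 (level : Int) : pvBisectGo 9 level 9 11 = (if level < 50 then (if level < 45 then 9 else 10) else 11) := by
  show (if level < 50 then pvBisectGo 8 level 9 10 else pvBisectGo 8 level 11 11) = _
  rw [pvB_9_10, pvB_11_11]

lemma pvB_0_5 (level : Int) : pvBisectGo 10 level 0 5 = (if level < 10 then (if level < 5 then (if level < 1 then 0 else 1) else 2) else (if level < 20 then (if level < 15 then 3 else 4) else 5)) := by
  show (if level < 10 then pvBisectGo 9 level 0 2 else pvBisectGo 9 level 3 5) = _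
  rw [pvB_0_2, pvB_3_5]

lemma pvB_6_11 (level : Int) : pvBisectGo 10 level 6 11 = (if level < 40 then (if level < 35 then (if level < 30 then 6 else 7) else 8) else (if level < 50 then (if level < 45 then 9 else 10) else 11)) := by
  show (if level < 40 then pvBisectGo 9 level 6 8 else pvBisectGo 9 level 9 11) = _
  rw [pvB_6_8, pvB_9_11]

lemma pvB_0_11 (level : Int) : pvBisectGo 11 level 0 11 = (if level < 25 then (if level < 10 then (if level < 5 then (if level < 1 then 0 else 1) else 2) else (if level < 20 then (if level < 15 then 3 else 4) else 5)) else (if level < 40 then (if level < 35 then (if level < 30 then 6 else 7) else 8) else (if level < 50 then (if level < 45 then 9 else 10) else 11))) := by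
  show (if level < 25 then pvBisectGo 10 level 0 5 else pvBisectGo 10 level 6 11) = _
  rw [pvB_0_5, pvB_6_11]

theorem get_role_for_level_spec : Claim_equal_get_role_for_level := by
  intro level _
  unfold Spec_get_role_for_level get_role_for_level get_role_for_level_alt
  simp only [pvThresholds, pvRoles, List.length_cons, List.length_nil, List.reverse_cons,
    List.reverse_nil, List.nil_append, List.cons_append]
  rw [pvB_0_11]
  simp only [pvALoop]
  by_cases h0 : level < 1
  · have hub : level < 1 := h0
    rw [if_neg (not_le.mpr (lt_of_lt_of_le hub (by decide : (1 : Int) ≤ 50))), if_neg (not_le.mpr (lt_of_lt_of_le hub (by decide : (1 : Int) ≤ 45))), if_neg (not_le.mpr (lt_of_lt_of_le hub (by decide : (1 : Int) ≤ 40))), if_neg (not_le.mpr (lt_of_lt_of_le hub (by decide : (1 : Int) ≤ 35))), if_neg (not_le.mpr (lt_of_lt_of_le hub (by decide : (1 : Int) ≤ 30))), if_neg (not_le.mpr (lt_of_lt_of_le hub (by decide : (1 : Int) ≤ 25))), if_neg (not_le.mpr (lt_of_lt_of_le hub (by decide : (1 : Int) ≤ 20))), if_neg (not_le.mpr (lt_of_lt_of_le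 hub (by decide : (1 : Int) ≤ 15))), if_neg (not_le.mpr (lt_of_lt_of_le hub (by decide : (1 : Int) ≤ 10))), if_neg (not_le.mpr (lt_of_lt_of_le hub (by decide : (1 : Int) ≤ 5))), if_neg (not_le.mpr hub), if_pos (lt_of_lt_of_le hub (by decide : (1 : Int) ≤ 25)), if_pos (lt_of_lt_of_le hub (by decide : (1 : Int) ≤ 10)), if_pos (lt_of_lt_of_le hub (by decide : (1 : Int) ≤ 5)), if_pos (hub)]
    rfl
  by_cases h1 : level < 5
  · have hub : level < 5 := h1
    have hlb : (1 : Int) ≤ level := not_lt.mp h0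
    rw [if_neg (not_le.mpr (lt_of_lt_of_le hub (by decide : (5 : Int) ≤ 50))), if_neg (not_le.mpr (lt_of_lt_of_le hub (by decide : (5 : Int) ≤ 45))), if_neg (not_le.mpr (lt_of_lt_of_le hub (by decide : (5 : Int) ≤ 40))), if_neg (not_le.mpr (lt_of_lt_of_le hub (by decide : (5 : Int) ≤ 35))), if_neg (not_le.mpr (lt_of_lt_of_le hub (by decide : (5 : Int) ≤ 30))), if_neg (not_le.mpr (lt_of_lt_of_le hub (by decide : (5 : Int) ≤ 25))), if_neg (not_le.mpr (lt_of_lt_of_le hub (by decide : (5 : Int) ≤ 20))), if_neg (not_le.mpr (lt_of_lt_of_le hub (by decide : (5 : Int) ≤ 15))), if_neg (not_le.mpr (lt_of_lt_of_le hub (by decide : (5 : Int) ≤ 10))), if_neg (not_le.mpr hub), if_pos (hlb), if_pos (lt_of_lt_of_le hub (by decide : (5 : Int) ≤ 25)), if_pos (lt_of_lt_of_le hub (by decide : (5 : Int) ≤ 10)), if_pos (hub), if_neg (not_lt.mpr hlb)]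
    rfl
  by_cases h2 : level < 10
  · have hub : level < 10 := h2
    have hlb : (5 : Int) ≤ level := not_lt.mp h1
    rw [if_neg (not_le.mpr (lt_of_lt_of_le hub (by decide : (10 : Int) ≤ 50))), if_neg (not_le.mpr (lt_of_lt_of_le hub (by decide : (10 : Int) ≤ 45))), if_neg (not_le.mpr (lt_of_lt_of_le hub (by decide : (10 : Int) ≤ 40))), if_neg (not_le.mpr (lt_of_lt_of_le hub (by decide : (10 : Int) ≤ 35))), if_neg (not_le.mpr (lt_of_lt_of_le hub (by decide : (10 : Int) ≤ 30))), if_neg (not_le.mpr (lt_of_lt_of_le hub (by decide : (10 : Int) ≤ 25))), if_neg (not_le.mpr (lt_of_lt_of_le hub (by decide : (10 : Int) ≤ 20))), if_neg (not_le.mpr (lt_of_lt_of_le hub (by decide : (10 : Int) ≤ 15))), if_neg (not_le.mpr hub), if_pos (hlb), if_pos (lt_of_lt_of_le hub (by decide : (10 : Int) ≤ 25)), if_pos (hub), if_neg (not_lt.mpr hlb)]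
    rfl
  by_cases h3 : level < 15
  · have hub : level < 15 := h3
    have hlb : (10 : Int) ≤ level := not_lt.mp h2
    rw [if_neg (not_le.mpr (lt_of_lt_of_le hub (by decide : (15 : Int) ≤ 50))), if_neg (not_le.mpr (lt_of_lt_of_le hub (by decide : (15 : Int) ≤ 45))), if_neg (not_le.mpr (lt_of_lt_of_le hub (by decide : (15 : Int) ≤ 40))), if_neg (not_le.mpr (lt_of_lt_of_le hub (by decide : (15 : Int) ≤ 35))), if_neg (not_le.mpr (lt_of_lt_of_le hub (by decide : (15 : Int) ≤ 30))), if_neg (not_le.mpr (lt_of_lt_of_le hub (by decide : (15 : Int) ≤ 25))), if_neg (not_le.mpr (lt_of_lt_of_le hub (by decide : (15 : Int) ≤ 20))), if_neg (not_le.mpr hub), if_pos (hlb), if_pos (lt_of_lt_of_le hub (by decide : (15 : Int) ≤ 25)), if_neg (not_lt.mpr hlb), if_pos (lt_of_lt_of_le hub (by decide : (15 : Int) ≤ 20)), if_pos (hub)]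
    rfl
  by_cases h4 : level < 20
  · have hub : level < 20 := h4
    have hlb : (15 : Int) ≤ level := not_lt.mp h3
    rw [if_neg (not_le.mpr (lt_of_lt_of_le hub (by decide : (20 : Int) ≤ 50))), if_neg (not_le.mpr (lt_of_lt_of_le hub (by decide : (20 : Int) ≤ 45))), if_neg (not_le.mpr (lt_of_lt_of_le hub (by decide : (20 : Int) ≤ 40))), if_neg (not_le.mpr (lt_of_lt_of_le hub (by decide : (20 : Int) ≤ 35))), if_neg (not_le.mpr (lt_of_lt_of_le hub (by decide : (20 : Int) ≤ 30))), if_neg (not_le.mpr (lt_of_lt_of_le hub (by decide : (20 : Int) ≤ 25))), if_neg (not_le.mpr hub), if_pos (hlb), if_pos (lt_of_lt_of_le hub (by decide : (20 : Int) ≤ 25)), if_neg (not_lt.mpr (le_trans (by decide : (10 : Int) ≤ 15) hlb)), if_pos (hub), if_neg (not_lt.mpr hlb)]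
    rfl
  by_cases h5 : level < 25
  · have hub : level < 25 := h5
    have hlb : (20 : Int) ≤ level := not_lt.mp h4
    rw [if_neg (not_le.mpr (lt_of_lt_of_le hub (by decide : (25 : Int) ≤ 50))), if_neg (not_le.mpr (lt_of_lt_of_le hub (by decide : (25 : Int) ≤ 45))), if_neg (not_le.mpr (lt_of_lt_of_le hub (by decide : (25 : Int) ≤ 40))), if_neg (not_le.mpr (lt_of_lt_of_le hub (by decide : (25 : Int) ≤ 35))), if_neg (not_le.mpr (lt_of_lt_of_le hub (by decide : (25 : Int) ≤ 30))), if_neg (not_le.mpr hub), if_pos (hlb), if_pos (hub), if_neg (not_lt.mpr (le_trans (by decide : (10 : Int) ≤ 20) hlb)), if_neg (not_lt.mpr hlb)]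
    rfl
  by_cases h6 : level < 30
  · have hub : level < 30 := h6
    have hlb : (25 : Int) ≤ level := not_lt.mp h5
    rw [if_neg (not_le.mpr (lt_of_lt_of_le hub (by decide : (30 : Int) ≤ 50))), if_neg (not_le.mpr (lt_of_lt_of_le hub (by decide : (30 : Int) ≤ 45))), if_neg (not_le.mpr (lt_of_lt_of_le hub (by decide : (30 : Int) ≤ 40))), if_neg (not_le.mpr (lt_of_lt_of_le hub (by decide : (30 : Int) ≤ 35))), if_neg (not_le.mpr hub), if_pos (hlb), if_neg (not_lt.mpr hlb), if_pos (lt_of_lt_of_le hub (by decide : (30 : Int) ≤ 40)), if_pos (lt_of_lt_of_le hub (by decide : (30 : Int) ≤ 35)), if_pos (hub)]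
    rfl
  by_cases h7 : level < 35
  · have hub : level < 35 := h7
    have hlb : (30 : Int) ≤ level := not_lt.mp h6
    rw [if_neg (not_le.mpr (lt_of_lt_of_le hub (by decide : (35 : Int) ≤ 50))), if_neg (not_le.mpr (lt_of_lt_of_le hub (by decide : (35 : Int) ≤ 45))), if_neg (not_le.mpr (lt_of_lt_of_le hub (by decide : (35 : Int) ≤ 40))), if_neg (not_le.mpr hub), if_pos (hlb), if_neg (not_lt.mpr (le_trans (by decide : (25 : Int) ≤ 30) hlb)), if_pos (lt_of_lt_of_le hub (by decide : (35 : Int) ≤ 40)), if_pos (hub), if_neg (not_lt.mpr hlb)]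
    rfl
  by_cases h8 : level < 40
  · have hub : level < 40 := h8
    have hlb : (35 : Int) ≤ level := not_lt.mp h7
    rw [if_neg (not_le.mpr (lt_of_lt_of_le hub (by decide : (40 : Int) ≤ 50))), if_neg (not_le.mpr (lt_of_lt_of_le hub (by decide : (40 : Int) ≤ 45))), if_neg (not_le.mpr hub), if_pos (hlb), if_neg (not_lt.mpr (le_trans (by decide : (25 : Int) ≤ 35) hlb)), if_pos (hub), if_neg (not_lt.mpr hlb)]
    rfl
  by_cases h9 : level < 45
  · have hub : level < 45 := h9
    have hlb : (40 : Int) ≤ level := not_lt.mp h8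
    rw [if_neg (not_le.mpr (lt_of_lt_of_le hub (by decide : (45 : Int) ≤ 50))), if_neg (not_le.mpr hub), if_pos (hlb), if_neg (not_lt.mpr (le_trans (by decide : (25 : Int) ≤ 40) hlb)), if_neg (not_lt.mpr hlb), if_pos (lt_of_lt_of_le hub (by decide : (45 : Int) ≤ 50)), if_pos (hub)]
    rfl
  by_cases h10 : level < 50
  · have hub : level < 50 := h10
    have hlb : (45 : Int) ≤ level := not_lt.mp h9
    rw [if_neg (not_le.mpr hub), if_pos (hlb), if_neg (not_lt.mpr (le_trans (by decide : (25 : Int) ≤ 45) hlb)), if_neg (not_lt.mpr (le_trans (by decide : (40 : Int) ≤ 45) hlb)), if_pos (hub), if_neg (not_lt.mpr hlb)]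
    rfl
  have hlb : (50 : Int) ≤ level := not_lt.mp h10
  rw [if_pos (hlb), if_neg (not_lt.mpr (le_trans (by decide : (25 : Int) ≤ 50) hlb)), if_neg (not_lt.mpr (le_trans (by decide : (40 : Int) ≤ 50) hlb)), if_neg (not_lt.mpr hlb)]
  rfl
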